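-- pv_equiv track=rewrite | github.com/bovreuil/python-garminconnect | jobs.py | find_continuous_segments
-- ===== SOURCE A (Python) =====
-- def find_continuous_segments(hr_series):
--     """
--     Find continuous segments in HR series data.
--     Segments are separated by gaps > 60 seconds.
--
--     Args:
--         hr_series: List of [timestamp, heart_rate] pairs
--
--     Returns:
--         List of segments, where each segment is a list of [timestamp, heart_rate] pairs
--     """
--     if not hr_series or len(hr_series) < 2:
--         return [hr_series] if hr_series else []
--
--     segments = []
--     current_segment = [hr_series[0]]
--
--     for i in range(1, len(hr_series)):
--         current_ts, current_hr = hr_series[i]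
--         prev_ts, prev_hr = hr_series[i-1]
--
--         # Check if gap is > 60 seconds
--         time_diff = (current_ts - prev_ts) / 1000  # Convert from milliseconds to seconds
--
--         if time_diff > 60:
--             # Gap is too large, start new segment
--             if current_segment:
--                 segments.append(current_segment)
--             current_segment = [hr_series[i]]
--         else:
--             # Gap is small enough, continue current segment
--             current_segment.append(hr_series[i])
--
--     # Add the last segment
--     if current_segment:
--         segments.append(current_segment)
--
--     return segments
-- ===== SOURCE B (Python) =====
-- def find_continuous_segments(hr_series):
--     n = len(hr_series)
--     if n == 0:
--         return []
--     breaks = [i for i in range(1, n)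
--               if (hr_series[i][0] - hr_series[i - 1][0]) / 1000 > 60]
--     bounds = [0] + breaks + [n]
--     return [hr_series[bounds[k]:bounds[k + 1]] for k in range(len(bounds) - 1)]
-- ===== Notes on version B (the rewrite author's own statement) =====
-- stated objective: simpler
-- what changed: A threads a (segments, current_segment) accumulator through the loop, appending and resetting; B first collects the break indices where the gap exceeds 60s, then builds the segments by slicing the input between consecutive boundaries.
-- outside the precondition, e.g. on find_continuous_segments([[0, 1, 2], [70000]]): A raises ValueError, B returns [[[0, 1, 2]], [[70000]]]
import Mathlib
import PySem

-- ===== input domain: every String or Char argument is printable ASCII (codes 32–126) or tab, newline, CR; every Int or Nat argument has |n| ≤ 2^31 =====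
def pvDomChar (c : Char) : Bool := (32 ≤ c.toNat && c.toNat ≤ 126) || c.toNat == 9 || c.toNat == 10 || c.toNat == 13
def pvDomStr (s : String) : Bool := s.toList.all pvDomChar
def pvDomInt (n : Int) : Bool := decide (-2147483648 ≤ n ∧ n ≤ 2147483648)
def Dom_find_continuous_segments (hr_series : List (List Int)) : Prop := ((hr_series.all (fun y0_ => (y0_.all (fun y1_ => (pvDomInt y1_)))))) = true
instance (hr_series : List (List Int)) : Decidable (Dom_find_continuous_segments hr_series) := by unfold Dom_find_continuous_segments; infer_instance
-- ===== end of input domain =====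

-- B replaces A's running (segments, current_segment) accumulator by collecting the break
-- indices first and slicing the input at those boundaries (objective: simpler decomposition).
-- Python's float test `(ts - prev)/1000 > 60` is ported as the integer test `ts - prev > 60000`,
-- exact for integer timestamps.

-- ===== PORT A =====
def find_continuous_segments (hr_series : List (List Int)) : List (List (List Int)) :=
  if hr_series = [] ∨ hr_series.length < 2 then
    if hr_series = [] then [] else [hr_series]
  else
    let init : List (List (List Int)) × List (List Int) :=
      ([], [PySem.List.pyGetD hr_series 0 []])
    let r := (PySem.List.pyRange 1 (hr_series.length : Int) 1).foldl
      (fun st i =>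
        let cur := PySem.List.pyGetD hr_series i []
        let prev := PySem.List.pyGetD hr_series (i - 1) []
        -- `current_ts, current_hr = hr_series[i]`: under Pre_ every row has length 2, so
        -- reading index 0 (the timestamp) is exact; current_hr / prev_hr are unused.
        let current_ts := PySem.List.pyGetD cur 0 0
        let prev_ts := PySem.List.pyGetD prev 0 0
        if current_ts - prev_ts > 60000 then
          (if st.2 ≠ [] then st.1 ++ [st.2] else st.1, [cur])
        else
          (st.1, st.2 ++ [cur])) init
    if r.2 ≠ [] then r.1 ++ [r.2] else r.1

-- ===== PORT B =====
def find_continuous_segments_alt (hr_series : List (List Int)) : List (List (List Int)) :=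
  let n : Int := hr_series.length
  if n = 0 then []
  else
    let breaks := (PySem.List.pyRange 1 n 1).filter (fun i =>
      decide (PySem.List.pyGetD (PySem.List.pyGetD hr_series i []) 0 0 -
              PySem.List.pyGetD (PySem.List.pyGetD hr_series (i - 1) []) 0 0 > 60000))
    let bounds : List Int := 0 :: (breaks ++ [n])
    (PySem.List.pyRange 0 ((bounds.length : Int) - 1) 1).map (fun k =>
      PySem.List.slice hr_series (some (PySem.List.pyGetD bounds k 0))
                                 (some (PySem.List.pyGetD bounds (k + 1) 0)))

-- ===== PRECONDITION & SPEC =====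
-- Pre_ excludes inputs of length ≥ 2 containing a row that is not a [timestamp, hr] pair:
-- there Python A's tuple unpacking raises ValueError (A returns on everything else).
def Pre_find_continuous_segments (hr_series : List (List Int)) : Prop :=
  hr_series.length < 2 ∨ ∀ x ∈ hr_series, x.length = 2
instance (hr_series : List (List Int)) : Decidable (Pre_find_continuous_segments hr_series) := by
  unfold Pre_find_continuous_segments; infer_instance

def pvWitness_find_continuous_segments : List (List Int) :=
  [[0, 100], [1000, 101], [70000, 90], [71000, 91]]

def Spec_find_continuous_segments (hr_series : List (List Int)) (out : List (List (List Int))) : Prop := out = find_continuous_segments_alt hr_series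
instance (hr_series : List (List Int)) (out : List (List (List Int))) : Decidable (Spec_find_continuous_segments hr_series out) := by unfold Spec_find_continuous_segments; infer_instance

-- ===== CLAIM (what is proved, stated in full; the proofs are below) =====
def Claim_equal_find_continuous_segments : Prop := ∀ (hr_series : List (List Int)), Dom_find_continuous_segments hr_series → Pre_find_continuous_segments hr_series → Spec_find_continuous_segments hr_series (find_continuous_segments hr_series)

-- ===== LEMMAS AND PROOFS =====

-- the gap test, as both ports compute it
def pvGap (hr : List (List Int)) (i : Int) : Bool :=
  decide (PySem.List.pyGetD (PySem.List.pyGetD hr i []) 0 0 -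
          PySem.List.pyGetD (PySem.List.pyGetD hr (i - 1) []) 0 0 > 60000)

-- A's loop body (the port's lambda, after let-expansion), named for the proofs
def pvStep (hr : List (List Int)) (st : List (List (List Int)) × List (List Int)) (i : Int) :
    List (List (List Int)) × List (List Int) :=
  if PySem.List.pyGetD (PySem.List.pyGetD hr i []) 0 0 -
      PySem.List.pyGetD (PySem.List.pyGetD hr (i - 1) []) 0 0 > 60000 then
    (if st.2 ≠ [] then st.1 ++ [st.2] else st.1, [PySem.List.pyGetD hr i []])
  else
    (st.1, st.2 ++ [PySem.List.pyGetD hr i []])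

-- snoc on the adjacent-pair list
theorem zip_tail_snoc {α : Type} (v : α) :
    ∀ (bl : List α) (x : α),
      ((x :: bl) ++ [v]).zip (bl ++ [v]) = (x :: bl).zip bl ++ [(bl.getLastD x, v)]
  | [], x => by simp
  | y :: t, x => by
      have ih := zip_tail_snoc v t y
      simp only [List.cons_append, List.zip_cons_cons] at *
      rw [ih]
      cases t with
      | nil => simp
      | cons h tl =>
          simp [List.getLast?_eq_some_getLast (l := h :: tl) (by simp)]

-- B's indexed comprehension over bounds as a zip with the tail
theorem range_map_adjacent_slice (hr : List (List Int)) :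
    ∀ (bl : List Int), bl ≠ [] →
      (PySem.List.pyRange 0 ((bl.length : Int) - 1) 1).map
        (fun k => PySem.List.slice hr (some (PySem.List.pyGetD bl k 0))
                                      (some (PySem.List.pyGetD bl (k + 1) 0))) =
      (bl.zip bl.tail).map (fun p => PySem.List.slice hr (some p.1) (some p.2))
  | [x], _ => by
      simp [PySem.List.pyRange_one_eq_nil]
  | x :: y :: t, _ => by
      have ih := range_map_adjacent_slice hr (y :: t) (by simp)
      have hlen : ((x :: y :: t).length : Int) - 1 = ((y :: t).length : Int) := by
        push_cast [List.length_cons]; ring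
      rw [hlen]
      have hpos : (0 : Int) < ((y :: t).length : Int) := by
        exact_mod_cast t.length.succ_pos
      rw [PySem.List.pyRange_one_cons hpos]
      simp only [List.map_cons, List.tail_cons, List.zip_cons_cons] at *
      congr 1
      · norm_num [pysem]
      · rw [← ih]
        have h01 : (0 : Int) + 1 = 1 := by norm_num
        rw [h01, PySem.List.pyRange_one 1 ((y :: t).length : Int),
            PySem.List.pyRange_one 0 (((y :: t).length : Int) - 1)]
        have h2 : (((y :: t).length : Int) - 1).toNat = t.length := by
          simp [List.length_cons]
        have h3 : (((y :: t).length : Int) - 1 - 0).toNat = t.length := by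
          omega
        rw [h2, h3, List.map_map, List.map_map]
        apply List.map_congr_left
        intro k _
        simp only [Function.comp_apply]
        have e1 : (1 : Int) + (k : Int) = ((k + 1 : Nat) : Int) := by push_cast; ring
        have e2 : ((k + 1 : Nat) : Int) + 1 = ((k + 2 : Nat) : Int) := by push_cast; ring
        have e3 : (0 : Int) + (k : Int) = ((k : Nat) : Int) := by ring
        have e4 : ((k : Nat) : Int) + 1 = ((k + 1 : Nat) : Int) := by push_cast; ring
        rw [e1, e2, e3, e4]
        simp only [PySem.List.pyGetD_natCast]
        have hk2 : k + 2 = (k + 1) + 1 := by omega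
        rw [hk2]
        simp [List.getD_eq_getElem?_getD, List.getElem?_cons_succ]

-- the last boundary so far lies in [0, m)
theorem getLastD_bounds (hr : List (List Int)) (m : Nat) :
    0 ≤ ((PySem.List.pyRange 1 (m : Int) 1).filter (pvGap hr)).getLastD 0 ∧
      (1 ≤ m → ((PySem.List.pyRange 1 (m : Int) 1).filter (pvGap hr)).getLastD 0 < (m : Int)) := by
  cases hfl : (PySem.List.pyRange 1 (m : Int) 1).filter (pvGap hr) with
  | nil =>
      simp only [List.getLastD_nil]
      exact ⟨le_refl 0, fun h => by exact_mod_cast h⟩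
  | cons z t =>
      have hne : z :: t ≠ [] := by simp
      have hmem : (z :: t).getLastD 0 ∈ z :: t := by
        rw [List.getLastD_eq_getLast?, List.getLast?_eq_some_getLast hne]
        exact List.getLast_mem hne
      have hmem2 : (z :: t).getLastD 0 ∈
          (PySem.List.pyRange 1 (m : Int) 1).filter (pvGap hr) := hfl ▸ hmem
      have hmem3 := List.mem_of_mem_filter hmem2
      have hb := (PySem.List.mem_pyRange_one).mp hmem3
      exact ⟨by omega, fun _ => by omega⟩

-- slice facts used by the invariant
theorem slice_snoc (hr : List (List Int)) (a : Int) (m : Nat)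
    (h0 : 0 ≤ a) (h1 : a ≤ (m : Int)) (h2 : m < hr.length) :
    PySem.List.slice hr (some a) (some (m : Int)) ++ [PySem.List.pyGetD hr (m : Int) []] =
    PySem.List.slice hr (some a) (some ((m : Int) + 1)) := by
  rw [PySem.List.slice_toNat hr h0 (by positivity), PySem.List.slice_toNat hr h0 (by omega)]
  have htn : ((m : Int) + 1).toNat = m + 1 := by omega
  have htm : ((m : Int)).toNat = m := by omega
  rw [htn, htm]
  have hget : (hr.drop a.toNat)[m - a.toNat]? = some hr[m] := by
    rw [List.getElem?_drop]
    have h : a.toNat + (m - a.toNat) = m := by omega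
    rw [h]
    exact List.getElem?_eq_getElem h2
  have h : m + 1 - a.toNat = (m - a.toNat) + 1 := by omega
  rw [h, List.take_add_one, hget]
  have h' : PySem.List.pyGetD hr (m : Int) [] = hr[m] := by
    simp [List.getD_eq_getElem?_getD, List.getElem?_eq_getElem h2]
  simp [h']

theorem slice_singleton (hr : List (List Int)) (m : Nat) (h2 : m < hr.length) :
    PySem.List.slice hr (some (m : Int)) (some ((m : Int) + 1)) =
      [PySem.List.pyGetD hr (m : Int) []] := by
  rw [← slice_snoc hr (m : Int) m (by positivity) (le_refl _) h2]
  have h : PySem.List.slice hr (some (m : Int)) (some (m : Int)) = [] := by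
    rw [PySem.List.slice_toNat hr (by positivity) (by positivity)]
    simp
  rw [h, List.nil_append]

theorem slice_nonempty (hr : List (List Int)) (a : Int) (m : Nat)
    (h0 : 0 ≤ a) (h1 : a < (m : Int)) (h2 : m ≤ hr.length) :
    PySem.List.slice hr (some a) (some (m : Int)) ≠ [] := by
  rw [PySem.List.slice_toNat hr h0 (by positivity)]
  intro hcontra
  have h := congrArg List.length hcontra
  simp only [List.length_take, List.length_drop, List.length_nil] at h
  omega

-- main loop invariant: A's accumulator after processing indices 1..m-1 is the list of
-- slices between consecutive boundaries seen so far, plus the open slice up to m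
theorem pv_inv (hr : List (List Int)) (m : Nat) (hm : 1 ≤ m) (hmn : m ≤ hr.length) :
    (PySem.List.pyRange 1 (m : Int) 1).foldl (pvStep hr) ([], [PySem.List.pyGetD hr 0 []]) =
    (((((0 : Int) :: (PySem.List.pyRange 1 (m : Int) 1).filter (pvGap hr)).zip
        ((PySem.List.pyRange 1 (m : Int) 1).filter (pvGap hr))).map
        (fun p => PySem.List.slice hr (some p.1) (some p.2))),
      PySem.List.slice hr
        (some (((PySem.List.pyRange 1 (m : Int) 1).filter (pvGap hr)).getLastD 0))
        (some (m : Int))) := by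
  revert hmn
  induction m, hm using Nat.le_induction with
  | base =>
      intro hmn
      have hr1 : PySem.List.pyRange 1 ((1 : Nat) : Int) 1 = [] := by
        apply PySem.List.pyRange_one_eq_nil; norm_num
      rw [hr1]
      obtain ⟨x, t, rfl⟩ : ∃ x t, hr = x :: t := by
        cases hr with
        | nil => simp at hmn
        | cons x t => exact ⟨x, t, rfl⟩
      simp only [List.filter_nil, List.foldl_nil, List.zip_nil_right, List.map_nil,
        List.getLastD_nil]
      rw [PySem.List.slice_toNat _ (by norm_num) (by norm_num)]
      simp [PySem.List.pyGetD_zero_cons]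
  | succ m hm ih =>
      intro hmn
      have ihm := ih (by omega)
      have hcast : (((m + 1 : Nat)) : Int) = (m : Int) + 1 := by push_cast; ring
      rw [hcast, PySem.List.pyRange_one_succ_right (by exact_mod_cast hm),
          List.foldl_append, List.foldl_cons, List.foldl_nil, ihm, List.filter_append,
          List.filter_cons, List.filter_nil]
      obtain ⟨ha0, haltm⟩ := getLastD_bounds hr m
      have halt : ((PySem.List.pyRange 1 (m : Int) 1).filter (pvGap hr)).getLastD 0 < (m : Int) :=
        haltm hm
      by_cases hg : PySem.List.pyGetD (PySem.List.pyGetD hr (m : Int) []) 0 0 -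
          PySem.List.pyGetD (PySem.List.pyGetD hr ((m : Int) - 1) []) 0 0 > 60000
      · have hgB : pvGap hr (m : Int) = true := by simp only [pvGap, decide_eq_true_eq]; exact hg
        have hne : PySem.List.slice hr
            (some (((PySem.List.pyRange 1 (m : Int) 1).filter (pvGap hr)).getLastD 0))
            (some (m : Int)) ≠ [] :=
          slice_nonempty hr _ m ha0 halt (by omega)
        simp only [pvStep]
        rw [if_pos hg, if_pos hne]
        simp only [hgB, if_true]
        congr 1
        · rw [← List.cons_append, zip_tail_snoc, List.map_append]
          simp
        · rw [List.getLastD_concat]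
          rw [slice_singleton hr m (by omega)]
      · have hgB : pvGap hr (m : Int) = false := by
          simp only [pvGap, decide_eq_false_iff_not]; exact hg
        simp only [pvStep]
        rw [if_neg hg]
        simp only [hgB, Bool.false_eq_true, if_false, List.append_nil]
        congr 1
        exact slice_snoc hr _ m ha0 (by omega) (by omega)

-- ===== VERDICT (by name: the statement is the Claim_ definition above) =====
theorem find_continuous_segments_spec : Claim_equal_find_continuous_segments := by
  intro hr _ _
  unfold Spec_find_continuous_segments
  have hA : find_continuous_segments hr =
      if hr = [] ∨ hr.length < 2 then (if hr = [] then [] else [hr])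
      else
        (let r := (PySem.List.pyRange 1 (hr.length : Int) 1).foldl (pvStep hr)
            ([], [PySem.List.pyGetD hr 0 []]);
         if r.2 ≠ [] then r.1 ++ [r.2] else r.1) := rfl
  have hB : find_continuous_segments_alt hr =
      if (hr.length : Int) = 0 then []
      else
        (PySem.List.pyRange 0
            (((((0 : Int) :: ((PySem.List.pyRange 1 (hr.length : Int) 1).filter (pvGap hr)
                ++ [(hr.length : Int)])).length : Int) - 1)) 1).map
          (fun k => PySem.List.slice hr
            (some (PySem.List.pyGetD ((0 : Int) ::
              ((PySem.List.pyRange 1 (hr.length : Int) 1).filter (pvGap hr)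
                ++ [(hr.length : Int)])) k 0))
            (some (PySem.List.pyGetD ((0 : Int) ::
              ((PySem.List.pyRange 1 (hr.length : Int) 1).filter (pvGap hr)
                ++ [(hr.length : Int)])) (k + 1) 0))) := rfl
  rw [hA, hB]
  by_cases h0 : hr = []
  · subst h0; simp
  · have hlpos : 0 < hr.length := List.length_pos_of_ne_nil h0
    have hn0 : ¬ ((hr.length : Int) = 0) := by
      simpa using Nat.pos_iff_ne_zero.mp hlpos
    rw [if_neg hn0]
    by_cases h1 : hr.length < 2
    · -- single-element series
      have hl1 : hr.length = 1 := by omega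
      rw [if_pos (Or.inr h1), if_neg h0]
      obtain ⟨x, rfl⟩ := List.length_eq_one_iff.mp hl1
      have hlen1 : (([x] : List (List Int)).length : Int) = 1 := by norm_num
      rw [hlen1, PySem.List.pyRange_one_eq_nil (le_refl 1)]
      simp only [List.filter_nil, List.nil_append]
      rw [range_map_adjacent_slice [x] [0, 1] (by simp)]
      simp only [List.tail_cons, List.zip_cons_cons, List.zip_nil_right, List.map_cons,
        List.map_nil]
      rw [PySem.List.slice_toNat _ (by norm_num) (by norm_num)]
      norm_num
    · -- length ≥ 2: the loop really runs
      rw [if_neg (by rw [not_or]; exact ⟨h0, by omega⟩)]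
      simp only []
      have key := pv_inv hr hr.length (by omega) (le_refl _)
      rw [key]
      obtain ⟨ha0, haltm⟩ := getLastD_bounds hr hr.length
      have halt := haltm (by omega)
      have hne : PySem.List.slice hr
          (some (((PySem.List.pyRange 1 (hr.length : Int) 1).filter (pvGap hr)).getLastD 0))
          (some (hr.length : Int)) ≠ [] :=
        slice_nonempty hr _ hr.length ha0 halt (le_refl _)
      rw [if_pos hne]
      rw [range_map_adjacent_slice hr _ (by simp)]
      simp only [List.tail_cons]
      rw [← List.cons_append, zip_tail_snoc, List.map_append]
      simp
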